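-- pv_equiv track=rewrite | github.com/nikitabolkar123/daily_practice_problems | practice_problems/logical/wednesday/count_pair_similar_string.py | num_similar_pairs
-- ===== SOURCE A (Python) =====
-- def num_similar_pairs(words):
--     count = 0
--     n = len(words)
--
--     for i in range(n):
--         for j in range(i + 1, n):
--             if set(words[i]) == set(words[j]):
--                 count += 1
--     return count
-- ===== SOURCE B (Python) =====
-- def num_similar_pairs(words):
--     total = 0
--     seen = {}
--     for w in words:
--         key = tuple(sorted(set(w)))
--         c = seen.get(key, 0)
--         total += c
--         seen[key] = c + 1
--     return total
-- ===== Notes on version B (the rewrite author's own statement) =====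
-- stated objective: faster
-- what changed: Replaced the O(n^2) all-pairs set comparison by a single pass that canonicalises each word to its sorted character set and counts, via a hash map of group sizes, how many earlier words share the same key.
import Mathlib
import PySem

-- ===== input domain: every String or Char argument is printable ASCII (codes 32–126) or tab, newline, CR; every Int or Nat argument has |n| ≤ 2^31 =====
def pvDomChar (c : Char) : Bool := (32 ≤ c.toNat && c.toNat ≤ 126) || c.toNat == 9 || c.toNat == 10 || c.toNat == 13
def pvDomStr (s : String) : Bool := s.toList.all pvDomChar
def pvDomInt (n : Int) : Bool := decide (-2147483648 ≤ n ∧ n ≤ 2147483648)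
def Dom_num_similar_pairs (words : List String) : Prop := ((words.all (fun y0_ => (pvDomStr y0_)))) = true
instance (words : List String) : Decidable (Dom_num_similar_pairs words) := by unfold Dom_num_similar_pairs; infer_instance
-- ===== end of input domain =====

-- B replaces A's all-pairs set comparison by one pass that groups words by their sorted
-- character set in a dictionary and adds, per word, the tally of earlier words with the
-- same key (objective: faster).

-- ===== PORT A =====
def num_similar_pairs (words : List String) : Int :=
  let n : Int := (words.length : Int)
  (PySem.List.pyRange 0 n 1).foldl (fun count i =>
    (PySem.List.pyRange (i + 1) n 1).foldl (fun count j =>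
      if PySem.Set.equal (PySem.Set.ofList (PySem.List.pyGetD words i "").toList)
                         (PySem.Set.ofList (PySem.List.pyGetD words j "").toList)
      then count + 1 else count) count) 0

-- ===== PORT B =====
-- tuple(sorted(set(w))): the word's distinct characters in increasing order
def pvKey (w : String) : List Char :=
  PySem.List.sorted (PySem.Set.ofList w.toList) (fun x => x) false

def num_similar_pairs_alt (words : List String) : Int :=
  (words.foldl (fun acc w =>
      let key := pvKey w
      let c := acc.2.getD key 0
      (acc.1 + c, acc.2.insert key (c + 1)))
    ((0 : Int), PySem.Dict.empty)).1

-- ===== PRECONDITION & SPEC =====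
def Spec_num_similar_pairs (words : List String) (out : Int) : Prop := out = num_similar_pairs_alt words
instance (words : List String) (out : Int) : Decidable (Spec_num_similar_pairs words out) := by unfold Spec_num_similar_pairs; infer_instance

-- ===== CLAIM (what is proved, stated in full; the proofs are below) =====
def Claim_equal_num_similar_pairs : Prop := ∀ (words : List String), Dom_num_similar_pairs words → Spec_num_similar_pairs words (num_similar_pairs words)

-- ===== LEMMAS AND PROOFS =====

-- Python's set(a) == set(b) holds exactly when the canonical sorted keys coincide
theorem pvKey_eq_iff (a b : String) :
    PySem.Set.equal (PySem.Set.ofList a.toList) (PySem.Set.ofList b.toList) = true ↔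
      pvKey a = pvKey b := by
  rw [PySem.Set.equal_iff]
  constructor
  · intro h
    unfold pvKey
    refine PySem.List.sorted_eq_of_perm_of_pairwise_lt _ _ (fun x => x) ?_ ?_
    · refine (PySem.List.sorted_perm (PySem.Set.ofList b.toList) (fun x : Char => x) false).trans ?_
      rw [List.perm_ext_iff_of_nodup (PySem.Set.nodup_ofList _) (PySem.Set.nodup_ofList _)]
      intro x; rw [← h x]
    · exact PySem.List.sorted_ofList_pairwise_lt _
  · intro h x
    have ha := PySem.List.mem_sorted (PySem.Set.ofList a.toList) (fun y => y) false x
    have hb := PySem.List.mem_sorted (PySem.Set.ofList b.toList) (fun y => y) false x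
    unfold pvKey at h
    rw [← ha, ← hb, h]

-- A rewritten as a sum of per-index inner-loop counts
theorem pvA_eq_sum (words : List String) :
    num_similar_pairs words =
      ((PySem.List.pyRange 0 (words.length : Int) 1).map
        (fun i => (((PySem.List.pyRange (i + 1) (words.length : Int) 1).countP
          (fun j => PySem.Set.equal
            (PySem.Set.ofList (PySem.List.pyGetD words i "").toList)
            (PySem.Set.ofList (PySem.List.pyGetD words j "").toList))) : Int))).sum := by
  unfold num_similar_pairs
  have h1 : ∀ (c i : Int),
      (PySem.List.pyRange (i + 1) (words.length : Int) 1).foldl (fun count j =>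
        if PySem.Set.equal (PySem.Set.ofList (PySem.List.pyGetD words i "").toList)
                           (PySem.Set.ofList (PySem.List.pyGetD words j "").toList)
        then count + 1 else count) c =
      c + (((PySem.List.pyRange (i + 1) (words.length : Int) 1).countP
          (fun j => PySem.Set.equal
            (PySem.Set.ofList (PySem.List.pyGetD words i "").toList)
            (PySem.Set.ofList (PySem.List.pyGetD words j "").toList))) : Int) := by
    intro c i
    exact PySem.List.foldl_if_add_one _ _ _
  calc (PySem.List.pyRange 0 (words.length : Int) 1).foldl (fun count i =>
        (PySem.List.pyRange (i + 1) (words.length : Int) 1).foldl (fun count j =>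
          if PySem.Set.equal (PySem.Set.ofList (PySem.List.pyGetD words i "").toList)
                             (PySem.Set.ofList (PySem.List.pyGetD words j "").toList)
          then count + 1 else count) count) 0
      = (PySem.List.pyRange 0 (words.length : Int) 1).foldl (fun count i =>
          count + (((PySem.List.pyRange (i + 1) (words.length : Int) 1).countP
          (fun j => PySem.Set.equal
            (PySem.Set.ofList (PySem.List.pyGetD words i "").toList)
            (PySem.Set.ofList (PySem.List.pyGetD words j "").toList))) : Int)) 0 := by
        exact PySem.List.foldl_congr_mem _ _ _ _ (fun c i _ => h1 c i)
    _ = _ := by rw [PySem.List.foldl_add]; simp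

-- appending one word adds, on A's side, the number of earlier similar words
theorem pvA_snoc (ws : List String) (w : String) :
    num_similar_pairs (ws ++ [w]) =
      num_similar_pairs ws +
        ((ws.countP (fun x =>
          PySem.Set.equal (PySem.Set.ofList x.toList) (PySem.Set.ofList w.toList))) : Int) := by
  rw [pvA_eq_sum, pvA_eq_sum]
  have hcast : (((ws ++ [w]).length : Nat) : Int) = (ws.length : Int) + 1 := by
    push_cast [List.length_append]; simp
  have hget : ∀ (j : Int), 0 ≤ j → j < (ws.length : Int) →
      PySem.List.pyGetD (ws ++ [w]) j "" = PySem.List.pyGetD ws j "" := by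
    intro j h0 hj
    rw [PySem.List.pyGetD_eq_getElem (ws ++ [w]) "" h0 (by simp; omega),
        PySem.List.pyGetD_eq_getElem ws "" h0 (by simpa using hj)]
    exact List.getElem_append_left _
  have hgetw : PySem.List.pyGetD (ws ++ [w]) (ws.length : Int) "" = w := by
    rw [PySem.List.pyGetD_eq_getElem (ws ++ [w]) "" (by positivity) (by simp)]
    simp
  rw [hcast, PySem.List.pyRange_one_succ_right (by positivity)]
  rw [List.map_append, List.sum_append]
  have hlast : PySem.List.pyRange ((ws.length : Int) + 1) ((ws.length : Int) + 1) = [] :=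
    PySem.List.pyRange_one_eq_nil le_rfl
  simp only [List.map_cons, List.map_nil, hlast, List.countP_nil, List.sum_cons, List.sum_nil]
  have hmap : (PySem.List.pyRange 0 (ws.length : Int)).map
      (fun i => (((PySem.List.pyRange (i + 1) ((ws.length : Int) + 1)).countP
        (fun j => PySem.Set.equal
          (PySem.Set.ofList (PySem.List.pyGetD (ws ++ [w]) i "").toList)
          (PySem.Set.ofList (PySem.List.pyGetD (ws ++ [w]) j "").toList))) : Int)) =
      (PySem.List.pyRange 0 (ws.length : Int)).map
      (fun i => (((PySem.List.pyRange (i + 1) (ws.length : Int)).countP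
        (fun j => PySem.Set.equal
          (PySem.Set.ofList (PySem.List.pyGetD ws i "").toList)
          (PySem.Set.ofList (PySem.List.pyGetD ws j "").toList))) : Int) +
        (if PySem.Set.equal
          (PySem.Set.ofList (PySem.List.pyGetD ws i "").toList)
          (PySem.Set.ofList w.toList) then 1 else 0)) := by
    refine List.map_congr_left ?_
    intro i hi
    rw [PySem.List.mem_pyRange_one] at hi
    rw [PySem.List.pyRange_one_succ_right (by omega)]
    rw [List.countP_append]
    rw [hget i hi.1 hi.2]
    have hinner : (PySem.List.pyRange (i + 1) (ws.length : Int)).countP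
        (fun j => PySem.Set.equal
          (PySem.Set.ofList (PySem.List.pyGetD ws i "").toList)
          (PySem.Set.ofList (PySem.List.pyGetD (ws ++ [w]) j "").toList)) =
        (PySem.List.pyRange (i + 1) (ws.length : Int)).countP
        (fun j => PySem.Set.equal
          (PySem.Set.ofList (PySem.List.pyGetD ws i "").toList)
          (PySem.Set.ofList (PySem.List.pyGetD ws j "").toList)) := by
      refine List.countP_congr ?_
      intro j hj
      rw [PySem.List.mem_pyRange_one] at hj
      rw [hget j (by omega) hj.2]
    rw [hinner]
    simp only [List.countP_cons, List.countP_nil, hgetw]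
    push_cast
    split_ifs with h
    · simp
    · simp
  rw [hmap, PySem.List.sum_map_add_int]
  have hind : ((PySem.List.pyRange 0 (ws.length : Int)).map
      (fun i => if PySem.Set.equal
          (PySem.Set.ofList (PySem.List.pyGetD ws i "").toList)
          (PySem.Set.ofList w.toList) then (1 : Int) else 0)).sum =
      ((ws.countP (fun x =>
        PySem.Set.equal (PySem.Set.ofList x.toList) (PySem.Set.ofList w.toList))) : Int) := by
    have hcomp : (PySem.List.pyRange 0 (ws.length : Int)).map
        (fun i => if PySem.Set.equal
            (PySem.Set.ofList (PySem.List.pyGetD ws i "").toList)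
            (PySem.Set.ofList w.toList) then (1 : Int) else 0) =
        ((PySem.List.pyRange 0 (ws.length : Int)).map
          (fun i => PySem.List.pyGetD ws i "")).map
          (fun x => if PySem.Set.equal
            (PySem.Set.ofList x.toList)
            (PySem.Set.ofList w.toList) then (1 : Int) else 0) := by
      rw [List.map_map]; rfl
    rw [hcomp, PySem.List.map_pyGetD_pyRange_zero', PySem.List.sum_map_ite_one_zero]
  rw [hind]
  ring

-- B's dictionary component is the running counter of keys
theorem pvB_snd (words : List String) (t : Int) (d : PySem.Dict (List Char) Int) :
    (words.foldl (fun acc w =>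
      let key := pvKey w
      let c := acc.2.getD key 0
      (acc.1 + c, acc.2.insert key (c + 1))) (t, d)).2 =
      (words.map pvKey).foldl (fun d k => d.insert k (d.getD k 0 + 1)) d := by
  induction words generalizing t d with
  | nil => rfl
  | cons x xs ih => simp only [List.foldl_cons, List.map_cons]; exact ih _ _

-- appending one word adds, on B's side, the tally stored under its key
theorem pvB_snoc (ws : List String) (w : String) :
    num_similar_pairs_alt (ws ++ [w]) =
      num_similar_pairs_alt ws + (((ws.map pvKey).count (pvKey w)) : Int) := by
  unfold num_similar_pairs_alt
  rw [List.foldl_append]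
  simp only [List.foldl_cons, List.foldl_nil]
  set st := ws.foldl (fun acc w =>
      let key := pvKey w
      let c := acc.2.getD key 0
      (acc.1 + c, acc.2.insert key (c + 1))) ((0 : Int), PySem.Dict.empty) with hst
  have h2 : st.2 = PySem.Dict.counter (ws.map pvKey) := by
    rw [hst, pvB_snd, PySem.Dict.foldl_insert_getD_add_one_eq_counter]
  show st.1 + st.2.getD (pvKey w) 0 = st.1 + ((ws.map pvKey).count (pvKey w) : Int)
  rw [h2, PySem.Dict.getD_counter]

theorem pvMain (words : List String) : num_similar_pairs words = num_similar_pairs_alt words := by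
  induction words using List.reverseRecOn with
  | nil => rfl
  | append_singleton ws w ih =>
      rw [pvA_snoc, pvB_snoc, ih]
      congr 1
      rw [List.count_eq_countP, List.countP_map]
      refine congrArg _ (List.countP_congr ?_)
      intro x _
      simp only [Function.comp]
      rw [Bool.eq_iff_iff, pvKey_eq_iff, beq_iff_eq]
      simp

-- ===== VERDICT (by name: the statement is the Claim_ definition above) =====
theorem num_similar_pairs_spec : Claim_equal_num_similar_pairs := by
  intro words _
  exact pvMain words
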